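-- pv_equiv track=rewrite | github.com/vivaksoni/marmoset_chimerism_demography | method_testing/scripts/get_sfs_for_fsc.py | get_sfs
-- ===== SOURCE A (Python) =====
-- def get_sfs(l_af, samples):
--     d_sfs = {}
--     s_seg = 0 #total number of truly segregating sites
--     s_not_anc = 0 #required to know the d0_0 class
--     #Loop through list of allele frequency categories
--     for x in l_af:
--         try:
--             #if the category already exists, incrememnt by one
--             d_sfs[x] = d_sfs[x] + 1
--         except:
--             #otherwise create the category
--             d_sfs[x] = 1
--         #add to count of segregating sites if not fixed or lost
--         if int(x) > 0 and int(x) < int(samples):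
--             s_seg += 1
--         if int(x) > 0:
--             s_not_anc += 1
--     return(d_sfs, s_seg, s_not_anc)
-- ===== SOURCE B (Python) =====
-- def get_sfs(l_af, samples):
--     # Build the full frequency table first
--     d_sfs = {}
--     for x in l_af:
--         d_sfs[x] = d_sfs.get(x, 0) + 1
--     # Aggregate the two totals per distinct category, weighted by its count
--     s_seg = 0
--     s_not_anc = 0
--     for k, c in d_sfs.items():
--         v = int(k)
--         if v > 0:
--             if v < int(samples):
--                 s_seg += c
--             s_not_anc += c
--     return (d_sfs, s_seg, s_not_anc)
-- ===== Notes on version B (the rewrite author's own statement) =====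
-- stated objective: alternative
-- what changed: B builds the frequency table first and then computes both segregating-site totals in a second pass over the distinct categories, adding each category's count once, instead of A's single per-element loop that re-parses and increments per element.
import Mathlib
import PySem

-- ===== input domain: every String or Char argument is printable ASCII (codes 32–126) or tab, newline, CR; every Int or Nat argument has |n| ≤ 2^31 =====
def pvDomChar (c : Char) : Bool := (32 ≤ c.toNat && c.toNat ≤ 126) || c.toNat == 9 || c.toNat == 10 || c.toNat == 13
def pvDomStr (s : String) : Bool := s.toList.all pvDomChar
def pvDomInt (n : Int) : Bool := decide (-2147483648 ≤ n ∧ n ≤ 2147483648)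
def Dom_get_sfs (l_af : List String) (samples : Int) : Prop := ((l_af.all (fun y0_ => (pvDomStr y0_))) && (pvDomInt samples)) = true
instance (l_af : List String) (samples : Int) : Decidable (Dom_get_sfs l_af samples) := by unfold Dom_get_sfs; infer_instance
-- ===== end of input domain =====

-- B builds the frequency table first, then aggregates both totals over the distinct categories weighted by counts (alternative decomposition, same cost).


-- ===== PORT A =====
-- one pass: per element update the dict and, re-parsing int(x), bump the two totals
def aStep (samples : Int) (st : PySem.Dict String Int × Int × Int) (x : String) :
    PySem.Dict String Int × Int × Int :=
  let d := st.1.insert x (st.1.getD x 0 + 1)   -- try d[x]+=1 except d[x]=1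
  let v := (PySem.Int.ofStr? x).getD 0          -- int(x); Pre_ excludes the none (ValueError) case
  let s_seg := if 0 < v ∧ v < samples then st.2.1 + 1 else st.2.1
  let s_not_anc := if 0 < v then st.2.2 + 1 else st.2.2
  (d, s_seg, s_not_anc)

def get_sfs (l_af : List String) (samples : Int) : (List (String × Int)) × Int × Int :=
  let st := l_af.foldl (aStep samples) (PySem.Dict.empty, 0, 0)
  (st.1.items, st.2.1, st.2.2)

-- ===== PORT B =====
-- pass 1: frequency table only
def bTable (l_af : List String) : PySem.Dict String Int :=
  l_af.foldl (fun d x => d.insert x (d.getD x 0 + 1)) PySem.Dict.empty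

-- pass 2: per distinct category k with count c, add c to the totals
def bStep (samples : Int) (acc : Int × Int) (kc : String × Int) : Int × Int :=
  let v := (PySem.Int.ofStr? kc.1).getD 0
  if 0 < v then
    ((if v < samples then acc.1 + kc.2 else acc.1), acc.2 + kc.2)
  else acc

def get_sfs_alt (l_af : List String) (samples : Int) : (List (String × Int)) × Int × Int :=
  let d := bTable l_af
  let t := d.items.foldl (bStep samples) (0, 0)
  (d.items, t.1, t.2)

-- ===== PRECONDITION & SPEC =====
-- Pre_ excludes exactly the inputs where Python's int(x) raises ValueError (both A and B raise there)
def Pre_get_sfs (l_af : List String) (samples : Int) : Prop :=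
  (l_af.all (fun x => (PySem.Int.ofStr? x).isSome)) = true
instance (l_af : List String) (samples : Int) : Decidable (Pre_get_sfs l_af samples) := by unfold Pre_get_sfs; infer_instance
def pvWitness_get_sfs : List String × Int := (["0", "1", "2", "1"], 2)

def Spec_get_sfs (l_af : List String) (samples : Int) (out : (List (String × Int)) × Int × Int) : Prop := out = get_sfs_alt l_af samples
instance (l_af : List String) (samples : Int) (out : (List (String × Int)) × Int × Int) : Decidable (Spec_get_sfs l_af samples out) := by unfold Spec_get_sfs; infer_instance

-- ===== CLAIM (what is proved, stated in full; the proofs are below) =====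
def Claim_equal_get_sfs : Prop := ∀ (l_af : List String) (samples : Int), Dom_get_sfs l_af samples → Pre_get_sfs l_af samples → Spec_get_sfs l_af samples (get_sfs l_af samples)

-- ===== LEMMAS AND PROOFS =====

-- the two per-element predicates (value parsed with the same getD 0 both ports use)
def pSeg (samples : Int) (x : String) : Bool :=
  decide (0 < (PySem.Int.ofStr? x).getD 0 ∧ (PySem.Int.ofStr? x).getD 0 < samples)
def pPos (x : String) : Bool := decide (0 < (PySem.Int.ofStr? x).getD 0)

-- A's fold splits into the dict fold and two countP's
lemma a_fold (samples : Int) (l : List String) :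
    ∀ (d : PySem.Dict String Int) (s1 s2 : Int),
      l.foldl (aStep samples) (d, s1, s2) =
        (l.foldl (fun d x => d.insert x (d.getD x 0 + 1)) d,
         s1 + l.countP (pSeg samples), s2 + l.countP pPos) := by
  induction l with
  | nil => intro d s1 s2; simp
  | cons x t ih =>
      intro d s1 s2
      simp only [List.foldl_cons, aStep, ih, List.countP_cons, pSeg, pPos,
        decide_eq_true_eq]
      refine Prod.ext rfl (Prod.ext ?_ ?_) <;> simp only [] <;>
        split_ifs <;> push_cast <;> ring

-- B's fold splits into two weighted sums over the items
lemma b_fold (samples : Int) (ps : List (String × Int)) :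
    ∀ (a b : Int),
      ps.foldl (bStep samples) (a, b) =
        (a + (ps.map (fun kc => if pSeg samples kc.1 then kc.2 else 0)).sum,
         b + (ps.map (fun kc => if pPos kc.1 then kc.2 else 0)).sum) := by
  induction ps with
  | nil => intro a b; simp
  | cons kc t ih =>
      intro a b
      simp only [List.foldl_cons, bStep, ih, List.map_cons, List.sum_cons, pSeg, pPos,
        decide_eq_true_eq]
      refine Prod.ext ?_ ?_ <;> simp only [] <;> split_ifs <;> try ring
      all_goals tauto

-- prepending x to the counted list shifts each weighted key-sum by (if P x then 1 else 0)
lemma sum_shift (P : String → Bool) (x : String) (t : List String) :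
    ∀ u : List String, u.Nodup → x ∈ u →
      (u.map (fun k => if P k then ((x :: t).count k : Int) else 0)).sum
        = (u.map (fun k => if P k then (t.count k : Int) else 0)).sum
          + (if P x then 1 else 0) := by
  intro u
  induction u with
  | nil => intro _ hx; cases hx
  | cons k u' ihu =>
      intro hnd hx
      rcases List.nodup_cons.mp hnd with ⟨hk, hu'⟩
      simp only [List.map_cons, List.sum_cons]
      rcases List.mem_cons.mp hx with h | h
      · subst h
        have hcnt : (u'.map (fun k => if P k then ((x :: t).count k : Int) else 0))
            = (u'.map (fun k => if P k then (t.count k : Int) else 0)) := by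
          apply List.map_congr_left
          intro y hy
          have hne : ¬ y = x := fun he => hk (he ▸ hy)
          rw [List.count_cons]
          split_ifs <;> simp_all
        rw [hcnt, List.count_cons_self]
        split_ifs <;> push_cast <;> ring
      · have hne : ¬ k = x := fun he => hk (he ▸ h)
        rw [List.count_cons, ihu hu' h]
        split_ifs <;> simp_all <;> push_cast <;> ring

-- summing (if P k then count) over the distinct keys covering l gives countP of l
lemma sum_ite_count (P : String → Bool) (u : List String) (hu : u.Nodup)
    (l : List String) (hcov : ∀ x ∈ l, x ∈ u) :
    (u.map (fun k => if P k then (l.count k : Int) else 0)).sum = l.countP P := by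
  induction l with
  | nil => simp
  | cons x t ih =>
      rw [sum_shift P x t u hu (hcov x (by simp)),
        ih (fun y hy => hcov y (by simp [hy])), List.countP_cons]
      split_ifs <;> simp_all <;> push_cast <;> ring

-- ===== VERDICT (by name: the statement is the Claim_ definition above) =====
theorem get_sfs_spec : Claim_equal_get_sfs := by
  intro l samples _ _
  show get_sfs l samples = get_sfs_alt l samples
  unfold get_sfs get_sfs_alt
  simp only [a_fold, b_fold]
  have hc : bTable l = PySem.Dict.counter l := rfl
  have hitems : (bTable l).items
      = (PySem.Set.ofList l).map (fun k => (k, (l.count k : Int))) := by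
    rw [hc, PySem.Dict.items_counter]
  refine Prod.ext rfl (Prod.ext ?_ ?_) <;> simp only [zero_add]
  · rw [hitems, List.map_map]
    exact (sum_ite_count (pSeg samples) (PySem.Set.ofList l)
      (PySem.Set.nodup_ofList l) l (fun x hx => (PySem.Set.mem_ofList l x).mpr hx)).symm
  · rw [hitems, List.map_map]
    exact (sum_ite_count pPos (PySem.Set.ofList l)
      (PySem.Set.nodup_ofList l) l (fun x hx => (PySem.Set.mem_ofList l x).mpr hx)).symm
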